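-- pv_equiv track=rewrite | github.com/Growail/Python-codes | 05 08 14.py | cambiaceros
-- ===== SOURCE A (Python) =====
-- def cambiaceros(num):
--     if num<1:
--         return "Número inválido"
--     else:
--         result=0
--         potencia=0
--         while num!=0:
--             if num%10==0:
--                 result=result+(1*(10**potencia))
--                 potencia+=1
--                 num=num//10
--             else:
--                 result=result+((num%10)*(10**potencia))
--                 potencia+=1
--                 num=num//10
--         return result
-- ===== SOURCE B (Python) =====
-- def cambiaceros(num):
--     if num < 1:
--         return "Número inválido"
--
--     def fix(n):
--         if n == 0:
--             return 0
--         d = n % 10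
--         return (d or 1) + 10 * fix(n // 10)
--
--     return fix(num)
-- ===== Notes on version B (the rewrite author's own statement) =====
-- stated objective: simpler
-- what changed: A's while loop with result/potencia accumulators and repeated 10**potencia powers is replaced by a direct structural recursion on the number that rebuilds the value as digit + 10*rest, with no power bookkeeping.
-- outside the precondition, e.g. on cambiaceros(0): A returns 'Número inválido', B returns 'Número inválido'
import Mathlib
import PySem

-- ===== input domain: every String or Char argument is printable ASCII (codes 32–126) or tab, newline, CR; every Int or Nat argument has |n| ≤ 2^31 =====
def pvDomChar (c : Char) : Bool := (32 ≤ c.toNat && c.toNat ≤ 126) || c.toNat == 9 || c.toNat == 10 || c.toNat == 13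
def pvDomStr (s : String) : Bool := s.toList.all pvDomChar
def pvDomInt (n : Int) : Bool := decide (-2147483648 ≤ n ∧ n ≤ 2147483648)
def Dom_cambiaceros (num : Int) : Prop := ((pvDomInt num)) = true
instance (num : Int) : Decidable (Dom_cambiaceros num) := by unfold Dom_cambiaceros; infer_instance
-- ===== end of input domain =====

-- B replaces A's result/potencia accumulation loop (with 10**potencia powers) by a
-- direct recursion rebuilding the value as digit + 10*rest (objective: simpler).
-- On num < 1 Python A returns the STRING "Número inválido" (not an int): Pre_ excludes it.

-- ===== PORT A =====
-- while num != 0 loop over the state (num, result, potencia); potencia stays ≥ 0 so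
-- 10**potencia is 10 ^ potencia.toNat (exact). The 0 < n guard only makes the
-- recursion total: for n < 0 Python's loop never terminates, and Pre_ excludes num < 1.
def cambiacerosLoop (n result potencia : Int) : Int :=
  if hz : n = 0 then result
  else if hp : 0 < n then
    if PySem.Int.mod n 10 = 0 then
      cambiacerosLoop (PySem.Int.floordiv n 10) (result + 1 * 10 ^ potencia.toNat) (potencia + 1)
    else
      cambiacerosLoop (PySem.Int.floordiv n 10) (result + PySem.Int.mod n 10 * 10 ^ potencia.toNat) (potencia + 1)
  else result
termination_by n.toNat
decreasing_by
  · have h10 : (0:Int) < 10 := by norm_num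
    rw [PySem.Int.floordiv_eq_ediv_of_pos h10]; omega
  · have h10 : (0:Int) < 10 := by norm_num
    rw [PySem.Int.floordiv_eq_ediv_of_pos h10]; omega

def cambiaceros (num : Int) : Int :=
  if num < 1 then 0   -- Python A returns the string "Número inválido" here; outside Pre_
  else cambiacerosLoop num 0 0

-- ===== PORT B =====
-- fix(n): 0 on n == 0, else (d or 1) + 10 * fix(n // 10); the n < 0 guard only makes
-- it total (that branch is never reached from cambiaceros_alt on Pre_).
def fixDigits (n : Int) : Int :=
  if hz : n = 0 then 0
  else if hp : 0 < n then
    (if PySem.Int.mod n 10 = 0 then 1 else PySem.Int.mod n 10) + 10 * fixDigits (PySem.Int.floordiv n 10)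
  else 0
termination_by n.toNat
decreasing_by
  have h10 : (0:Int) < 10 := by norm_num
  rw [PySem.Int.floordiv_eq_ediv_of_pos h10]; omega

def cambiaceros_alt (num : Int) : Int :=
  if num < 1 then 0   -- Python B returns the string "Número inválido" here; outside Pre_
  else fixDigits num

-- ===== PRECONDITION & SPEC =====
-- Pre_ excludes num < 1, where A returns the string "Número inválido" instead of an int.
def Pre_cambiaceros (num : Int) : Prop := 1 ≤ num
instance (num : Int) : Decidable (Pre_cambiaceros num) := by unfold Pre_cambiaceros; infer_instance

def pvWitness_cambiaceros : Int := (10203)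

def Spec_cambiaceros (num : Int) (out : Int) : Prop := out = cambiaceros_alt num
instance (num : Int) (out : Int) : Decidable (Spec_cambiaceros num out) := by unfold Spec_cambiaceros; infer_instance

-- ===== CLAIM (what is proved, stated in full; the proofs are below) =====
def Claim_equal_cambiaceros : Prop := ∀ (num : Int), Dom_cambiaceros num → Pre_cambiaceros num → Spec_cambiaceros num (cambiaceros num)

-- ===== LEMMAS AND PROOFS =====

-- Loop invariant: for n ≥ 0, A's loop computes result + 10^potencia * fix n.
theorem cambiacerosLoop_eq_aux : ∀ (k : Nat) (n : Int), n.toNat ≤ k → 0 ≤ n →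
    ∀ (result potencia : Int), 0 ≤ potencia → cambiacerosLoop n result potencia
      = result + 10 ^ potencia.toNat * fixDigits n := by
  intro k
  induction k with
  | zero =>
    intro n hk hn result potencia hpnn
    have h0 : n = 0 := by omega
    rw [cambiacerosLoop, fixDigits]
    simp [h0]
  | succ k ih =>
    intro n hk hn result potencia hpnn
    rcases eq_or_lt_of_le hn with h0 | hpos
    · rw [cambiacerosLoop, fixDigits]
      simp [← h0]
    · have h10 : (0:Int) < 10 := by norm_num
      have hq : PySem.Int.floordiv n 10 = n / 10 := PySem.Int.floordiv_eq_ediv_of_pos h10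
      have hqlt : n / 10 < n := by omega
      have hqnn : 0 ≤ n / 10 := by omega
      have hqk : (n / 10).toNat ≤ k := by omega
      have hnz : n ≠ 0 := by omega
      rw [cambiacerosLoop, fixDigits]
      simp only [hnz, hpos, dif_neg, dif_pos, if_pos, dite_false, dite_true]
      have hpt : (potencia + 1).toNat = potencia.toNat + 1 := by omega
      by_cases hm : PySem.Int.mod n 10 = 0
      · simp only [hm, if_pos, ite_true]
        rw [hq, ih (n / 10) hqk hqnn _ _ (by omega), hpt]; ring
      · simp only [hm, ite_false]
        rw [hq, ih (n / 10) hqk hqnn _ _ (by omega), hpt]; ring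

theorem cambiacerosLoop_eq (n : Int) (hn : 0 ≤ n) (result potencia : Int) (hp : 0 ≤ potencia) :
    cambiacerosLoop n result potencia = result + 10 ^ potencia.toNat * fixDigits n :=
  cambiacerosLoop_eq_aux n.toNat n le_rfl hn result potencia hp

-- ===== VERDICT (by name: the statement is the Claim_ definition above) =====
theorem cambiaceros_spec : Claim_equal_cambiaceros := by
  intro num _ hpre
  unfold Spec_cambiaceros cambiaceros cambiaceros_alt
  have hlt : ¬ num < 1 := by exact not_lt.mpr hpre
  simp only [hlt, ite_false]
  rw [cambiacerosLoop_eq num (by omega) 0 0 le_rfl]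
  simp
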